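-- pv_equiv track=rewrite | github.com/alswo1212/jungle_baekjoon | 프로그래머스/2/389479. 서버 증설 횟수/서버 증설 횟수.py | solution
-- ===== SOURCE A (Python) =====
-- def solution(players, m, k):
--     l = len(players)
--     server_cnt, scale_out_cnt = [0] * l, [0] * l
--     for i in range(l):
--         p = players[i]
--         scale_out = max(p // m - server_cnt[i], 0)
--         if scale_out:
--             scale_out_cnt[i] = scale_out
--             for j in range(i, min(l, i+k)):
--                 server_cnt[j] += scale_out
--
--     return sum(scale_out_cnt)
-- ===== SOURCE B (Python) =====
-- def solution(players, m, k):
--     l = len(players)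
--     add = [0] * l          # add[i] = servers added at hour i
--     active = 0             # servers still running from the last k-1 hours
--     total = 0
--     for i in range(l):
--         if k > 1 and i >= k:
--             active -= add[i - k]      # additions from hour i-k have expired
--         need = players[i] // m - active
--         if need > 0:
--             add[i] = need
--             total += need
--             if k > 1:
--                 active += need
--     return total
-- ===== Notes on version B (the rewrite author's own statement) =====
-- stated objective: faster
-- what changed: A re-scans and increments up to k server_cnt entries for every scale-out (O(l*k)); B makes a single pass keeping a running count of still-active additions, subtracting each addition when it expires k hours later (O(l)).
import Mathlib
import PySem

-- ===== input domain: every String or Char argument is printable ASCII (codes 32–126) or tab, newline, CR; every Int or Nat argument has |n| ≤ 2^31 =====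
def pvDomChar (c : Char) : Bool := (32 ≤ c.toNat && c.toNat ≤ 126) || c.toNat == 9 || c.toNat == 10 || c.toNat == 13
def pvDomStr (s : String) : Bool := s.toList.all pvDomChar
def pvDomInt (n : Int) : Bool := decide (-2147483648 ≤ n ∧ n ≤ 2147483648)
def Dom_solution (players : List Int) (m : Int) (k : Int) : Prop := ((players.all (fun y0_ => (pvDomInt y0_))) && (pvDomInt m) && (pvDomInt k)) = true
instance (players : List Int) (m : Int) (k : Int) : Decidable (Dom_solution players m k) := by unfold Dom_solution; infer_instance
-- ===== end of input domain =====

-- B replaces A's per-scale-out inner rescale loop by a single pass keeping a running count of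
-- still-active server additions with explicit expiry (intended as faster: a timing run
-- measured B ~2.3-2.5x faster than A at n=262144, though not on every generated input).

-- ===== PORT A =====
-- one step of A's outer loop; state = (server_cnt, scale_out_cnt)
def solStepA (players : List Int) (m k : Int) (l : Int)
    (st : List Int × List Int) (i : Int) : List Int × List Int :=
  let p := PySem.List.pyGetD players i 0
  let scaleOut := max (PySem.Int.floordiv p m - PySem.List.pyGetD st.1 i 0) 0
  if scaleOut ≠ 0 then
    let so := PySem.List.pySetD st.2 i scaleOut
    let sc := (PySem.List.pyRange i (min l (i + k)) 1).foldl
      (fun sc j => PySem.List.pySetD sc j (PySem.List.pyGetD sc j 0 + scaleOut)) st.1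
    (sc, so)
  else st

def solution (players : List Int) (m : Int) (k : Int) : Int :=
  let l : Int := (players.length : Int)
  let st := (PySem.List.pyRange 0 l 1).foldl (solStepA players m k l)
    (List.replicate players.length 0, List.replicate players.length 0)
  st.2.sum

-- ===== PORT B =====
-- one step of B's single pass; state = (add, active, total)
def solStepB (players : List Int) (m k : Int)
    (st : List Int × Int × Int) (i : Int) : List Int × Int × Int :=
  let active := if k > 1 ∧ i ≥ k then st.2.1 - PySem.List.pyGetD st.1 (i - k) 0 else st.2.1
  let need := PySem.Int.floordiv (PySem.List.pyGetD players i 0) m - active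
  if need > 0 then
    (PySem.List.pySetD st.1 i need, (if k > 1 then active + need else active), st.2.2 + need)
  else (st.1, active, st.2.2)

def solution_alt (players : List Int) (m : Int) (k : Int) : Int :=
  let l : Int := (players.length : Int)
  ((PySem.List.pyRange 0 l 1).foldl (solStepB players m k)
    (List.replicate players.length 0, 0, 0)).2.2

-- ===== PRECONDITION & SPEC =====
-- Pre_ excludes only m = 0 with a nonempty players list, on which Python's p // m raises ZeroDivisionError.
def Pre_solution (players : List Int) (m : Int) (k : Int) : Prop := players = [] ∨ m ≠ 0
instance (players : List Int) (m : Int) (k : Int) : Decidable (Pre_solution players m k) := by unfold Pre_solution; infer_instance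
def pvWitness_solution : List Int × Int × Int := ([10, 20, 0, 5], 3, 2)

def Spec_solution (players : List Int) (m : Int) (k : Int) (out : Int) : Prop := out = solution_alt players m k
instance (players : List Int) (m : Int) (k : Int) (out : Int) : Decidable (Spec_solution players m k out) := by unfold Spec_solution; infer_instance

-- ===== CLAIM (what is proved, stated in full; the proofs are below) =====
def Claim_equal_solution : Prop := ∀ (players : List Int) (m : Int) (k : Int), Dom_solution players m k → Pre_solution players m k → Spec_solution players m k (solution players m k)

-- ===== LEMMAS AND PROOFS =====


-- windowed sum of additions still covering hour j, after the first i hours were processed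
def pvS (k : Int) (add : List Int) (i : Nat) (j : Int) : Int :=
  ∑ t ∈ Finset.range i, if j < (t : Int) + k then add.getD t 0 else 0

-- B's running `active` value after the first i hours
def pvAct (k : Int) (add : List Int) (i : Nat) : Int :=
  if 1 < k then ∑ t ∈ Finset.range i, if (i : Int) ≤ (t : Int) + k then add.getD t 0 else 0 else 0

theorem pvGetDSetNe (l : List Int) (i t : Nat) (v : Int) (h : t ≠ i) :
    (l.set i v).getD t 0 = l.getD t 0 := by
  simp [List.getD, List.getElem?_set_ne (by omega : i ≠ t)]

theorem pvGetDSetSelf (l : List Int) (i : Nat) (v : Int) (h : i < l.length) :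
    (l.set i v).getD i 0 = v := by
  simp [List.getD, h]

theorem pvSumSet (l : List Int) (i : Nat) (v : Int) (h : i < l.length) (h0 : l.getD i 0 = 0) :
    (l.set i v).sum = l.sum + v := by
  have hg : l[i] = 0 := by simpa [List.getD, List.getElem?_eq_getElem h] using h0
  have h2 := List.sum_set l i v
  have h3 := List.sum_set l i (l[i])
  rw [List.set_getElem_self] at h3
  rw [h2, h3, if_pos h, if_pos h, hg]
  ring

-- effect of A's inner rescale loop, expressed entrywise
theorem pvIncRange (v : Int) : ∀ (cnt : Nat) (a b : Int) (sc : List Int), 0 ≤ a →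
    b ≤ (sc.length : Int) → (b - a).toNat = cnt →
    (((PySem.List.pyRange a b 1).foldl
        (fun s j => PySem.List.pySetD s j (PySem.List.pyGetD s j 0 + v)) sc).length = sc.length ∧
     ∀ t : Nat, ((PySem.List.pyRange a b 1).foldl
        (fun s j => PySem.List.pySetD s j (PySem.List.pyGetD s j 0 + v)) sc).getD t 0
        = sc.getD t 0 + (if a ≤ (t : Int) ∧ (t : Int) < b then v else 0)) := by
  intro cnt
  induction cnt with
  | zero =>
    intro a b sc ha hb hc
    have hba : b ≤ a := by omega
    rw [PySem.List.pyRange_one_eq_nil hba]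
    refine ⟨rfl, fun t => ?_⟩
    have : ¬ (a ≤ (t : Int) ∧ (t : Int) < b) := by omega
    simp [this]
  | succ n ih =>
    intro a b sc ha hb hc
    have hab : a < b := by omega
    rw [PySem.List.pyRange_one_cons hab, List.foldl_cons]
    have hset : PySem.List.pySetD sc a (PySem.List.pyGetD sc a 0 + v)
        = sc.set a.toNat (PySem.List.pyGetD sc a 0 + v) := PySem.List.pySetD_of_nonneg _ _ ha
    have hlen : (sc.set a.toNat (PySem.List.pyGetD sc a 0 + v)).length = sc.length := by
      simp
    have halt : a < (sc.length : Int) := lt_of_lt_of_le hab hb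
    have hant : a.toNat < sc.length := by omega
    obtain ⟨ihl, ihg⟩ := ih (a + 1) b (sc.set a.toNat (PySem.List.pyGetD sc a 0 + v))
      (by omega) (by rw [hlen]; exact hb) (by omega)
    rw [hset]
    refine ⟨by rw [ihl, hlen], fun t => ?_⟩
    rw [ihg t]
    by_cases hta : (t : Int) = a
    · have htn : t = a.toNat := by omega
      rw [htn, pvGetDSetSelf _ _ _ hant]
      have hget : PySem.List.pyGetD sc a 0 = sc.getD a.toNat 0 := by
        rw [PySem.List.pyGetD_eq_getElem _ _ ha halt]
        simp [List.getD, List.getElem?_eq_getElem hant]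
      have h1 : ¬ (a + 1 ≤ (a.toNat : Int)) := by omega
      have h2 : (a ≤ (a.toNat : Int) ∧ (a.toNat : Int) < b) := by omega
      rw [if_neg (by omega : ¬ (a + 1 ≤ (a.toNat : Int) ∧ (a.toNat : Int) < b)), if_pos h2, hget]
      ring
    · rw [pvGetDSetNe _ _ _ _ (by omega : t ≠ a.toNat)]
      have : (a + 1 ≤ (t : Int) ∧ (t : Int) < b) ↔ (a ≤ (t : Int) ∧ (t : Int) < b) := by omega
      simp only [this]

-- B's expiry step turns `active` into the window sum that A reads off server_cnt[i]
theorem pvActStep (k : Int) (add : List Int) (i : Nat) (hi : i < add.length) :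
    (if 1 < k ∧ (i : Int) ≥ k then pvAct k add i - PySem.List.pyGetD add ((i : Int) - k) 0
     else pvAct k add i) = pvS k add i (i : Int) := by
  unfold pvAct pvS
  by_cases hk : 1 < k
  · by_cases hik : (i : Int) ≥ k
    · rw [if_pos ⟨hk, hik⟩, if_pos hk]
      have hkn : ((i : Int) - k).toNat < i := by omega
      have hkl : ((i : Int) - k).toNat < add.length := by omega
      have hget : PySem.List.pyGetD add ((i : Int) - k) 0 = add.getD ((i : Int) - k).toNat 0 := by
        rw [PySem.List.pyGetD_eq_getElem _ _ (by omega) (by omega)]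
        simp [List.getD, List.getElem?_eq_getElem hkl]
      have hsplit : ∀ t ∈ Finset.range i,
          (if (i : Int) ≤ (t : Int) + k then add.getD t 0 else 0)
          = (if (i : Int) < (t : Int) + k then add.getD t 0 else 0)
            + (if t = ((i : Int) - k).toNat then add.getD t 0 else 0) := by
        intro t ht
        by_cases hteq : t = ((i : Int) - k).toNat
        · have h1 : (i : Int) ≤ (t : Int) + k := by omega
          have h2 : ¬ ((i : Int) < (t : Int) + k) := by omega
          rw [if_pos h1, if_neg h2, if_pos hteq]; ring
        · have hne : ((t : Int) + k) ≠ (i : Int) := by omega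
          have : ((i : Int) ≤ (t : Int) + k) ↔ ((i : Int) < (t : Int) + k) := by omega
          simp only [this]
          rw [if_neg hteq]; ring
      rw [Finset.sum_congr rfl hsplit, Finset.sum_add_distrib, hget,
        Finset.sum_ite_eq' (Finset.range i) (((i : Int) - k).toNat) (fun t => add.getD t 0)]
      rw [if_pos (Finset.mem_range.mpr hkn)]
      ring
    · rw [if_neg (by tauto), if_pos hk]
      refine Finset.sum_congr rfl fun t ht => ?_
      have ht' : t < i := Finset.mem_range.mp ht
      have : ((i : Int) ≤ (t : Int) + k) ↔ ((i : Int) < (t : Int) + k) := by omega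
      simp only [this]
  · rw [if_neg (by tauto), if_neg hk]
    symm
    refine Finset.sum_eq_zero fun t ht => ?_
    have ht' : t < i := Finset.mem_range.mp ht
    rw [if_neg (by omega)]


theorem pvS_diag_nonpos (k : Int) (add : List Int) (i : Nat) (hk : ¬ 1 < k) :
    pvS k add i (i : Int) = 0 := by
  unfold pvS
  refine Finset.sum_eq_zero fun t ht => ?_
  have := Finset.mem_range.mp ht
  rw [if_neg (by omega)]

theorem pvS_set_succ (k : Int) (add : List Int) (i : Nat) (j v : Int) (hi : i < add.length) :
    pvS k (add.set i v) (i + 1) j = pvS k add i j + (if j < (i : Int) + k then v else 0) := by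
  unfold pvS
  rw [Finset.sum_range_succ, pvGetDSetSelf _ _ _ hi]
  congr 1
  refine Finset.sum_congr rfl fun t ht => ?_
  have := Finset.mem_range.mp ht
  rw [pvGetDSetNe _ _ _ _ (by omega)]

theorem pvS_succ_zero (k : Int) (add : List Int) (i : Nat) (j : Int) (h0 : add.getD i 0 = 0) :
    pvS k add (i + 1) j = pvS k add i j := by
  unfold pvS
  rw [Finset.sum_range_succ, h0]
  simp

theorem pvAct_succ_set (k : Int) (add : List Int) (i : Nat) (v : Int) (hk : 1 < k)
    (hi : i < add.length) :
    pvAct k (add.set i v) (i + 1) = pvS k add i (i : Int) + v := by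
  unfold pvAct pvS
  rw [if_pos hk, Finset.sum_range_succ, pvGetDSetSelf _ _ _ hi,
    if_pos (by push_cast; omega : ((i + 1 : Nat) : Int) ≤ (i : Int) + k)]
  congr 1
  refine Finset.sum_congr rfl fun t ht => ?_
  have := Finset.mem_range.mp ht
  rw [pvGetDSetNe _ _ _ _ (by omega)]
  have : (((i + 1 : Nat) : Int) ≤ (t : Int) + k) ↔ ((i : Int) < (t : Int) + k) := by push_cast; omega
  simp only [this]

theorem pvAct_succ_keep (k : Int) (add : List Int) (i : Nat) (h0 : add.getD i 0 = 0) :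
    pvAct k add (i + 1) = pvS k add i (i : Int) := by
  unfold pvAct
  by_cases hk : 1 < k
  · rw [if_pos hk, Finset.sum_range_succ, h0]
    unfold pvS
    simp only [if_pos (by push_cast; omega : ((i + 1 : Nat) : Int) ≤ (i : Int) + k), add_zero]
    refine Finset.sum_congr rfl fun t ht => ?_
    have := Finset.mem_range.mp ht
    have : (((i + 1 : Nat) : Int) ≤ (t : Int) + k) ↔ ((i : Int) < (t : Int) + k) := by push_cast; omega
    simp only [this]
  · rw [if_neg hk, pvS_diag_nonpos k add i hk]

-- the MAIN INVARIANT: from matching mid-loop states, both remaining folds give the same answer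
theorem pvMain (players : List Int) (m k : Int) : ∀ (cnt i : Nat) (sc so add : List Int)
    (active total : Int),
    i + cnt = players.length →
    sc.length = players.length → add.length = players.length →
    so = add →
    total = add.sum →
    (∀ t : Nat, i ≤ t → add.getD t 0 = 0) →
    (∀ j : Nat, i ≤ j → j < players.length → sc.getD j 0 = pvS k add i (j : Int)) →
    active = pvAct k add i →
    ((PySem.List.pyRange (i : Int) ((players.length : Nat) : Int) 1).foldl
        (solStepA players m k ((players.length : Nat) : Int)) (sc, so)).2.sum
      = ((PySem.List.pyRange (i : Int) ((players.length : Nat) : Int) 1).foldl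
        (solStepB players m k) (add, active, total)).2.2 := by
  intro cnt
  induction cnt with
  | zero =>
    intro i sc so add active total hcnt hlsc hladd hso htot hzero hsc hact
    have : ((players.length : Nat) : Int) ≤ (i : Int) := by omega
    rw [PySem.List.pyRange_one_eq_nil this]
    simp only [List.foldl_nil]
    rw [hso, htot]
  | succ cnt' ih =>
    intro i sc so add active total hcnt hlsc hladd hso htot hzero hsc hact
    have hin : i < players.length := by omega
    have hcons := PySem.List.pyRange_one_cons
      (show (i : Int) < ((players.length : Nat) : Int) by exact_mod_cast hin)
    rw [hcons]
    have hcast : ((i : Int) + 1) = ((i + 1 : Nat) : Int) := by push_cast; ring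
    rw [hcast]
    simp only [List.foldl_cons, solStepA, solStepB]
    have hgetsc : PySem.List.pyGetD sc (i : Int) 0 = pvS k add i (i : Int) := by
      rw [PySem.List.pyGetD_natCast]; exact hsc i le_rfl hin
    have hact2 : (if 1 < k ∧ (i : Int) ≥ k then active - PySem.List.pyGetD add ((i : Int) - k) 0
        else active) = pvS k add i (i : Int) := by
      rw [hact]; exact pvActStep k add i (by omega)
    rw [hgetsc, hact2]
    by_cases hpos : 0 < PySem.Int.floordiv (PySem.List.pyGetD players (i : Int) 0) m
        - pvS k add i (i : Int)
    · have hmax : max (PySem.Int.floordiv (PySem.List.pyGetD players (i : Int) 0) m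
          - pvS k add i (i : Int)) 0 = PySem.Int.floordiv (PySem.List.pyGetD players (i : Int) 0) m
          - pvS k add i (i : Int) := by omega
      rw [hmax, if_pos (by omega : PySem.Int.floordiv (PySem.List.pyGetD players (i : Int) 0) m
          - pvS k add i (i : Int) ≠ 0), if_pos hpos]
      set v := PySem.Int.floordiv (PySem.List.pyGetD players (i : Int) 0) m
          - pvS k add i (i : Int) with hv
      have hsetso : PySem.List.pySetD so (i : Int) v = so.set i v := by
        rw [PySem.List.pySetD_of_nonneg _ _ (by omega)]; norm_num
      have hsetadd : PySem.List.pySetD add (i : Int) v = add.set i v := by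
        rw [PySem.List.pySetD_of_nonneg _ _ (by omega)]; norm_num
      rw [hsetso, hsetadd]
      obtain ⟨hscl, hscg⟩ := pvIncRange v ((min ((players.length : Nat) : Int) ((i : Int) + k)
          - (i : Int)).toNat) (i : Int) (min ((players.length : Nat) : Int) ((i : Int) + k)) sc
          (by omega) (by rw [hlsc]; omega) rfl
      refine ih (i + 1) _ _ _ _ _ (by omega) (by rw [hscl, hlsc]) (by simp [hladd])
        (by rw [hso]) ?_ ?_ ?_ ?_
      · rw [pvSumSet add i v (by omega) (hzero i le_rfl), htot]
      · intro t ht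
        rw [pvGetDSetNe _ _ _ _ (by omega), hzero t (by omega)]
      · intro j hj hjn
        rw [hscg j, hsc j (by omega) hjn, pvS_set_succ k add i (j : Int) v (by omega)]
        have : ((i : Int) ≤ (j : Int) ∧ (j : Int) < min ((players.length : Nat) : Int)
            ((i : Int) + k)) ↔ ((j : Int) < (i : Int) + k) := by omega
        simp only [this]
      · by_cases hk : 1 < k
        · rw [if_pos hk, pvAct_succ_set k add i v hk (by omega)]
        · rw [if_neg hk, pvS_diag_nonpos k add i hk]
          unfold pvAct
          rw [if_neg hk]
    · have hmax : max (PySem.Int.floordiv (PySem.List.pyGetD players (i : Int) 0) m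
          - pvS k add i (i : Int)) 0 = 0 := by omega
      rw [hmax, if_neg (by simp), if_neg hpos]
      refine ih (i + 1) _ _ _ _ _ (by omega) hlsc hladd hso htot ?_ ?_ ?_
      · intro t ht
        exact hzero t (by omega)
      · intro j hj hjn
        rw [hsc j (by omega) hjn, pvS_succ_zero k add i (j : Int) (hzero i le_rfl)]
      · rw [pvAct_succ_keep k add i (hzero i le_rfl)]


-- ===== VERDICT (by name: the statement is the Claim_ definition above) =====
theorem solution_spec : Claim_equal_solution := by
  intro players m k _ _
  show solution players m k = solution_alt players m k
  simp only [solution, solution_alt]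
  refine pvMain players m k players.length 0 _ _ _ _ _ (by omega) (by simp) (by simp) rfl
    (by simp) ?_ ?_ ?_
  · intro t _
    simp [List.getD, List.getElem?_replicate]
    split <;> rfl
  · intro j _ _
    simp [pvS, List.getD, List.getElem?_replicate]
    split <;> rfl
  · simp [pvAct]
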